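-- pv_equiv track=rewrite | github.com/rez-dev/metaheuristica | FA/new basuraa/test5.py | distancia_luciernagas
-- ===== SOURCE A (Python) =====
-- def distancia_luciernagas(luciernaga1, luciernaga2):
--     aristas_ruta1 = set(luciernaga1)
--     aristas_ruta2 = set(luciernaga2)
--     diferencias = aristas_ruta1.difference(aristas_ruta2)
--     cantidad_aristas_distintas = len(diferencias)
--     # reverse each edge
--     aristas_inversas = set(map(lambda x: (x[1], x[0]), diferencias))
--     for arista in aristas_inversas:
--         if arista in aristas_ruta2:
--             cantidad_aristas_distintas -= 1
--     return cantidad_aristas_distintas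
-- ===== SOURCE B (Python) =====
-- def distancia_luciernagas(luciernaga1, luciernaga2):
--     # canonical (undirected) form of every edge of route 2, built once
--     canon2 = set()
--     for (a, b) in luciernaga2:
--         canon2.add((b, a) if b < a else (a, b))
--     # one pass over route 1: dedup on the fly, one membership test per new edge
--     count = 0
--     seen = set()
--     for e in luciernaga1:
--         if e not in seen:
--             seen.add(e)
--             a, b = e
--             if ((b, a) if b < a else (a, b)) not in canon2:
--                 count += 1
--     return count
-- ===== Notes on version B (the rewrite author's own statement) =====
-- stated objective: alternative
-- what changed: Instead of A's set difference plus a reversed-edge set and a decrement loop, B canonicalizes route 2's edges to undirected (min,max) form once and then makes a single accumulator pass over route 1 with on-the-fly dedup, doing one canonical membership test per edge instead of two directed ones.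
import Mathlib
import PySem

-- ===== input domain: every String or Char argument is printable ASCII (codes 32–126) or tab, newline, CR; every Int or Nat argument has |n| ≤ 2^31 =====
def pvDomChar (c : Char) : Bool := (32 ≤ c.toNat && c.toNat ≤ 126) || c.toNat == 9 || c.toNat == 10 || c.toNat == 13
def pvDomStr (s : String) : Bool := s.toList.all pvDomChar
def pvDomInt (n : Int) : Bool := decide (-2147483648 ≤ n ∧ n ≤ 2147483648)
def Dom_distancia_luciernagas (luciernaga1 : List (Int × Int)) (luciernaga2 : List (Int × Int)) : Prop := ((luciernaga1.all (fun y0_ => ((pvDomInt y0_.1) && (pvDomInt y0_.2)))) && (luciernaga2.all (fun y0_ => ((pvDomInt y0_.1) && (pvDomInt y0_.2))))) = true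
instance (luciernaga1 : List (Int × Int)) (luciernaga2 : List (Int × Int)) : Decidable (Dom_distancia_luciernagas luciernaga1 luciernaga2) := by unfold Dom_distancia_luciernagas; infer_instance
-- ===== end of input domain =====

-- B canonicalizes route 2's edges to undirected (min,max) form once, then makes one
-- accumulator pass over route 1 with on-the-fly dedup; objective: alternative algorithm.

-- ===== PORT A =====
def distancia_luciernagas (luciernaga1 : List (Int × Int)) (luciernaga2 : List (Int × Int)) : Int :=
  let aristas_ruta1 := PySem.Set.ofList luciernaga1
  let aristas_ruta2 := PySem.Set.ofList luciernaga2
  let diferencias := PySem.Set.diff aristas_ruta1 aristas_ruta2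
  let cantidad_aristas_distintas : Int := PySem.Set.len diferencias
  let aristas_inversas := PySem.Set.ofList (diferencias.map (fun x => (x.2, x.1)))
  -- the loop only decrements on membership, so the result is independent of set iteration order
  aristas_inversas.foldl
    (fun c arista => if PySem.Set.contains aristas_ruta2 arista then c - 1 else c)
    cantidad_aristas_distintas

-- ===== PORT B =====
-- ((b, a) if b < a else (a, b)) from Source B
def pvCanon (e : Int × Int) : Int × Int := if e.2 < e.1 then (e.2, e.1) else (e.1, e.2)

def distancia_luciernagas_alt (luciernaga1 : List (Int × Int)) (luciernaga2 : List (Int × Int)) : Int :=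
  let canon2 := luciernaga2.foldl (fun s e => PySem.Set.add s (pvCanon e)) PySem.Set.empty
  let res := luciernaga1.foldl
    (fun (st : PySem.Set (Int × Int) × Int) e =>
      if PySem.Set.contains st.1 e then st
      else (PySem.Set.add st.1 e,
            if PySem.Set.contains canon2 (pvCanon e) then st.2 else st.2 + 1))
    (PySem.Set.empty, 0)
  res.2

-- ===== PRECONDITION & SPEC =====
def Spec_distancia_luciernagas (luciernaga1 : List (Int × Int)) (luciernaga2 : List (Int × Int)) (out : Int) : Prop := out = distancia_luciernagas_alt luciernaga1 luciernaga2
instance (luciernaga1 : List (Int × Int)) (luciernaga2 : List (Int × Int)) (out : Int) : Decidable (Spec_distancia_luciernagas luciernaga1 luciernaga2 out) := by unfold Spec_distancia_luciernagas; infer_instance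

-- ===== CLAIM =====
def Claim_equal_distancia_luciernagas : Prop := ∀ (luciernaga1 : List (Int × Int)) (luciernaga2 : List (Int × Int)), Dom_distancia_luciernagas luciernaga1 luciernaga2 → Spec_distancia_luciernagas luciernaga1 luciernaga2 (distancia_luciernagas luciernaga1 luciernaga2)

-- ===== LEMMAS AND PROOFS =====

-- A's decrement loop equals the initial value minus the count of matching elements.
theorem foldl_dec_count {α : Type} (p : α → Bool) (l : List α) (c : Int) :
    l.foldl (fun c a => if p a then c - 1 else c) c = c - (l.countP p : Int) := by
  induction l generalizing c with
  | nil => simp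
  | cons x xs ih =>
    simp only [List.foldl_cons, List.countP_cons, ih]
    by_cases h : p x = true <;> simp [h]
    omega

theorem swap_injective : Function.Injective (fun x : Int × Int => (x.2, x.1)) := by
  intro a b h
  simp only [Prod.mk.injEq] at h
  exact Prod.ext h.2 h.1

-- A computes the count of deduplicated edges of route 1 absent from route 2 in both orientations.
theorem distancia_eq_countP (luciernaga1 luciernaga2 : List (Int × Int)) :
    distancia_luciernagas luciernaga1 luciernaga2 =
      (((PySem.Set.ofList luciernaga1).countP
        (fun e => !PySem.Set.contains (PySem.Set.ofList luciernaga2) e &&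
                  !PySem.Set.contains (PySem.Set.ofList luciernaga2) (e.2, e.1)) : Nat) : Int) := by
  unfold distancia_luciernagas
  simp only []
  set s1 := PySem.Set.ofList luciernaga1 with hs1
  set s2 := PySem.Set.ofList luciernaga2 with hs2
  set q : Int × Int → Bool := fun e => PySem.Set.contains s2 e with hq
  have hd : PySem.Set.diff s1 s2 = s1.filter (fun x => !q x) := rfl
  have hnd : (s1.filter (fun x => !q x)).Nodup :=
    List.Nodup.filter _ (PySem.Set.nodup_ofList luciernaga1)
  have hmapnd : ((s1.filter (fun x => !q x)).map (fun x => (x.2, x.1))).Nodup :=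
    hnd.map swap_injective
  rw [hd, PySem.Set.ofList_eq_self_of_nodup _ hmapnd, foldl_dec_count, List.countP_map]
  have hlen : (s1.filter (fun x => !q x)).length =
      s1.countP (fun x => !q x) := List.countP_eq_length_filter.symm
  have hsplit : s1.countP (fun x => !q x) =
      ((s1.filter (fun x => !q x)).countP (fun x => q (x.2, x.1))) +
        s1.countP (fun e => !q e && !q (e.2, e.1)) := by
    rw [List.countP_filter]
    induction s1 with
    | nil => simp
    | cons y ys ih =>
      simp only [List.countP_cons, ih]
      by_cases h1 : q y = true <;> by_cases h2 : q (y.2, y.1) = true <;>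
        simp [h1, h2] <;> omega
  rw [hq] at hlen hsplit
  simp only [PySem.Set.len, Function.comp_def]
  rw [hlen, hsplit]
  push_cast
  ring

-- canon f = canon e exactly when f is e or its reversal.
theorem canon_eq_iff (f e : Int × Int) :
    pvCanon f = pvCanon e ↔ f = e ∨ f = (e.2, e.1) := by
  rcases f with ⟨a, b⟩; rcases e with ⟨c, d⟩
  unfold pvCanon
  split_ifs <;> simp [Prod.ext_iff] <;> omega

-- the canonical membership test of B equals A's two directed tests.
theorem contains_canon (luciernaga2 : List (Int × Int)) (e : Int × Int) :
    PySem.Set.contains (PySem.Set.ofList (luciernaga2.map pvCanon)) (pvCanon e) =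
      (PySem.Set.contains (PySem.Set.ofList luciernaga2) e ||
       PySem.Set.contains (PySem.Set.ofList luciernaga2) (e.2, e.1)) := by
  rw [Bool.eq_iff_iff, Bool.or_eq_true, PySem.Set.contains_iff, PySem.Set.contains_iff,
    PySem.Set.contains_iff, PySem.Set.mem_ofList, PySem.Set.mem_ofList, PySem.Set.mem_ofList,
    List.mem_map]
  constructor
  · rintro ⟨f, hf, hfe⟩
    rcases (canon_eq_iff f e).mp hfe with h | h <;> [left; right] <;> rwa [← h]
  · rintro (h | h)
    · exact ⟨e, h, rfl⟩
    · exact ⟨(e.2, e.1), h, (canon_eq_iff _ e).mpr (Or.inr rfl)⟩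

-- B's dedup-and-count loop: invariant over an arbitrary seen set and counter.
theorem foldl_seen_count {α : Type} [BEq α] [LawfulBEq α] (p : α → Bool) (l : List α)
    (s : PySem.Set α) (c : Int) :
    (l.foldl
      (fun (st : PySem.Set α × Int) e =>
        if PySem.Set.contains st.1 e then st
        else (PySem.Set.add st.1 e, if p e then st.2 else st.2 + 1))
      (s, c)).2 = c + (((PySem.Set.update s l).drop s.length).countP (fun e => !p e) : Nat) := by
  induction l generalizing s c with
  | nil => simp [PySem.Set.update]
  | cons x xs ih =>
    rw [List.foldl_cons, PySem.Set.update_cons]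
    by_cases hx : x ∈ s
    · rw [if_pos ((PySem.Set.contains_iff s x).mpr hx), PySem.Set.add_of_mem hx, ih]
    · have hc : ¬ PySem.Set.contains s x = true := by
        rw [PySem.Set.contains_iff]; exact hx
      rw [if_neg hc, PySem.Set.add_of_not_mem hx, ih,
        PySem.Set.update_eq_append_filter]
      set rest := (PySem.Set.ofList xs).filter
        (fun y => !(PySem.Set.contains (s ++ [x]) y)) with hrest
      have h1 : ((s ++ [x]) ++ rest).drop (s ++ [x]).length = rest := List.drop_left
      have h2 : ((s ++ [x]) ++ rest).drop s.length = x :: rest := by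
        rw [List.append_assoc]
        exact List.drop_left
      rw [h1, h2, List.countP_cons]
      by_cases hp : p x = true <;> simp [hp] <;> omega

-- B equals the same count over the deduplicated edges of route 1.
theorem alt_eq_countP (luciernaga1 luciernaga2 : List (Int × Int)) :
    distancia_luciernagas_alt luciernaga1 luciernaga2 =
      (((PySem.Set.ofList luciernaga1).countP
        (fun e => !PySem.Set.contains (PySem.Set.ofList luciernaga2) e &&
                  !PySem.Set.contains (PySem.Set.ofList luciernaga2) (e.2, e.1)) : Nat) : Int) := by
  unfold distancia_luciernagas_alt
  simp only []
  have hcanon2 : luciernaga2.foldl (fun s e => PySem.Set.add s (pvCanon e)) PySem.Set.empty =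
      PySem.Set.ofList (luciernaga2.map pvCanon) := by
    rw [← PySem.Set.update_map_eq_foldl_add]; rfl
  rw [hcanon2,
    foldl_seen_count (fun e => PySem.Set.contains
      (PySem.Set.ofList (luciernaga2.map pvCanon)) (pvCanon e)) luciernaga1 PySem.Set.empty 0,
    (rfl : PySem.Set.update PySem.Set.empty luciernaga1 = PySem.Set.ofList luciernaga1)]
  simp only [PySem.Set.empty, List.length_nil, List.drop_zero, zero_add, Nat.cast_inj]
  apply List.countP_congr
  intro e _
  rw [contains_canon]
  cases PySem.Set.contains (PySem.Set.ofList luciernaga2) e <;>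
    cases PySem.Set.contains (PySem.Set.ofList luciernaga2) (e.2, e.1) <;> rfl

-- ===== VERDICT =====
theorem distancia_luciernagas_spec : Claim_equal_distancia_luciernagas := by
  intro l1 l2 _
  unfold Spec_distancia_luciernagas
  rw [distancia_eq_countP, alt_eq_countP]
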